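-- pv_equiv track=rewrite | github.com/Girin7716/PythonCoding | Programmers/2019_kakao_winter_intern/64065.py | solution
-- ===== SOURCE A (Python) =====
-- def solution(s):
--     answer = []
--     s = s.replace('},{','/')
--     s = s.replace('{','')
--     s = s.replace('}','')
--     s = s.split('/')
--     s.sort(key= lambda x : len(x))
--
--     rem = set()
--     for number in s:
--         for n in number.split(','):
--             if n not in rem:
--                 rem.add(n)
--                 answer.append(int(n))
--                 break
--
--     return answer
-- ===== SOURCE B (Python) =====
-- def solution(s):
--     groups = s.replace('},{', '/').replace('{', '').replace('}', '').split('/')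
--     toks = [t for g in groups for t in g.split(',')]
--     return [int(t) for t in sorted(dict.fromkeys(toks), key=lambda t: -toks.count(t))]
-- ===== Notes on version B (the rewrite author's own statement) =====
-- stated objective: idiomatic
-- what changed: Instead of sorting the group strings by length and scanning each group against a growing seen-set, B flattens all tokens and orders the distinct tokens by descending frequency (an element introduced at position k appears in exactly n-k+1 groups), with no per-group scan or seen-set.
-- outside the precondition, e.g. on solution('1,2'): A returns [1], B returns [1, 2]; on solution('{{1,2},{3}}'): A returns [3, 1], B returns [1, 2, 3]
import Mathlib
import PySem

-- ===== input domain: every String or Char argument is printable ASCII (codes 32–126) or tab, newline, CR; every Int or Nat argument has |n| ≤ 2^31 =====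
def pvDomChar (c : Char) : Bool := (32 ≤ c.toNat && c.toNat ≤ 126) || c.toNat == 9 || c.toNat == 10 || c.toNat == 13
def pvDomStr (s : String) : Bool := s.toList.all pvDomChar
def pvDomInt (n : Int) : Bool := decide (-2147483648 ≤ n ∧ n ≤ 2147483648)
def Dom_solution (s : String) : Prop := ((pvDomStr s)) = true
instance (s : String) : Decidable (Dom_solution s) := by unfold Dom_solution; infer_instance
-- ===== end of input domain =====

-- B replaces A's sort-groups-by-length + growing seen-set scan by ordering the distinct
-- tokens by descending frequency over all groups (same return value on Pre_; no speed claim).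

-- ===== PORT A =====
-- inner 'for n in number.split(','): if n not in rem: … break' — returns the first token not in rem
def solutionInner (rem : PySem.Set String) : List String → Option String
  | [] => none
  | n :: rest =>
      if PySem.Set.contains rem n then solutionInner rem rest else some n

-- outer 'for number in s: …' with state (rem, answer); int(n) → ofStr? (none = ValueError, excluded by Pre_)
def solutionLoop : List String → PySem.Set String → List Int → List Int
  | [], _, answer => answer
  | number :: rest, rem, answer =>
      match solutionInner rem ((PySem.Str.split? number ",").getD []) with
      | some n => solutionLoop rest (PySem.Set.add rem n) (answer ++ [(PySem.Int.ofStr? n).getD 0])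
      | none => solutionLoop rest rem answer

def solution (s : String) : List Int :=
  let s1 := PySem.Str.replace s "},{" "/"
  let s2 := PySem.Str.replace s1 "{" ""
  let s3 := PySem.Str.replace s2 "}" ""
  let parts := (PySem.Str.split? s3 "/").getD []     -- separator '/' nonempty: split? is never none
  let partsSorted := PySem.List.sorted parts (fun x => PySem.Str.len x)
  solutionLoop partsSorted PySem.Set.empty []

-- ===== PORT B =====
def solution_alt (s : String) : List Int :=
  let groups := (PySem.Str.split? (PySem.Str.replace (PySem.Str.replace
      (PySem.Str.replace s "},{" "/") "{" "") "}" "") "/").getD []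
  let toks := groups.flatMap (fun g => (PySem.Str.split? g ",").getD [])
  (PySem.List.sorted (PySem.List.dedup toks) (fun t => -(PySem.List.count toks t : Int))).map
    (fun t => (PySem.Int.ofStr? t).getD 0)

-- ===== PRECONDITION & SPEC =====
-- the group strings of s, parsed exactly as both programs parse them (shape description for Pre_)
def pvGroupStrs (s : String) : List String :=
  (PySem.Str.split? (PySem.Str.replace (PySem.Str.replace
      (PySem.Str.replace s "},{" "/") "{" "") "}" "") "/").getD []

def pvToks (g : String) : List String := (PySem.Str.split? g ",").getD []

-- Pre_ restricts to well-formed kakao "tuple" strings: each group has distinct int-like tokens,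
-- the group sizes are exactly 1..n, smaller groups are subsets of larger ones (hence shorter strings).
-- It excludes inputs where A raises ValueError (non-numeric chosen token) and malformed inputs on
-- which A's first-unseen-per-group scan and B's frequency order legitimately diverge (frequency ties).
def Pre_solution (s : String) : Prop :=
  (∀ g ∈ pvGroupStrs s, (pvToks g).Nodup ∧ ∀ t ∈ pvToks g, (PySem.Int.ofStr? t).isSome) ∧
  ((pvGroupStrs s).map (fun g => (pvToks g).length)).Perm (List.range' 1 (pvGroupStrs s).length) ∧
  (∀ g ∈ pvGroupStrs s, ∀ h ∈ pvGroupStrs s,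
      (pvToks g).length ≤ (pvToks h).length → ∀ t ∈ pvToks g, t ∈ pvToks h) ∧
  (∀ g ∈ pvGroupStrs s, ∀ h ∈ pvGroupStrs s,
      (pvToks g).length < (pvToks h).length → PySem.Str.len g < PySem.Str.len h)

instance (s : String) : Decidable (Pre_solution s) := by unfold Pre_solution; infer_instance

def pvWitness_solution : String := "{{1},{2,1}}"

def Spec_solution (s : String) (out : List Int) : Prop := out = solution_alt s
instance (s : String) (out : List Int) : Decidable (Spec_solution s out) := by unfold Spec_solution; infer_instance

-- ===== CLAIM (what is proved, stated in full; the proofs are below) =====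
def Claim_equal_solution : Prop := ∀ (s : String), Dom_solution s → Pre_solution s → Spec_solution s (solution s)

-- ===== LEMMAS AND PROOFS =====

-- first token of l not in prev (total companion of solutionInner)
def pvPick : List String → List String → String
  | [], _ => ""
  | t :: rest, prev => if t ∈ prev then pvPick rest prev else t

-- the tokens A appends, in order, when the previous group's tokens are prev
def pvChosen : List String → List String → List String
  | [], _ => []
  | g :: rest, prev => pvPick (pvToks g) prev :: pvChosen rest (pvToks g)

-- the chain invariant along the sorted group list
def pvChain : List String → List String → Prop
  | [], _ => True
  | g :: rest, prev =>
      prev ⊆ pvToks g ∧ (pvToks g).Nodup ∧ (pvToks g).length = prev.length + 1 ∧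
      pvChain rest (pvToks g)

def pvAllToks (s : String) : List String := (pvGroupStrs s).flatMap pvToks

lemma pvPick_spec (l prev : List String) (h : ∃ t ∈ l, t ∉ prev) :
    pvPick l prev ∈ l ∧ pvPick l prev ∉ prev := by
  induction l with
  | nil => simp at h
  | cons t rest ih =>
    by_cases ht : t ∈ prev
    · obtain ⟨w, hw, hwp⟩ := h
      rcases List.mem_cons.mp hw with hw | hw
      · exact absurd (hw ▸ ht) hwp
      · have := ih ⟨w, hw, hwp⟩
        simp [pvPick, ht, this.1, this.2]
    · simp [pvPick, ht]

lemma solutionInner_eq (l prev : List String) (rem : PySem.Set String)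
    (hrem : ∀ x, PySem.Set.contains rem x = true ↔ x ∈ prev)
    (h : ∃ t ∈ l, t ∉ prev) :
    solutionInner rem l = some (pvPick l prev) := by
  induction l with
  | nil => simp at h
  | cons t rest ih =>
    by_cases ht : t ∈ prev
    · have hc : PySem.Set.contains rem t = true := (hrem t).2 ht
      obtain ⟨w, hw, hwp⟩ := h
      have hmem : t ∈ rem := (PySem.Set.contains_iff rem t).mp hc
      rcases List.mem_cons.mp hw with hw | hw
      · exact absurd (hw ▸ ht) hwp
      · simp [solutionInner, hmem, pvPick, ht, ih ⟨w, hw, hwp⟩]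
    · have hmem : t ∉ rem := fun hm => ht ((hrem t).1 ((PySem.Set.contains_iff rem t).mpr hm))
      simp [solutionInner, hmem, pvPick, ht]

-- the step fact: with prev ⊆ G, both nodup, |G| = |prev|+1, the pick exists and G = {pick} ∪ prev
lemma pvStep (G prev : List String) (hnd : prev.Nodup) (hG : G.Nodup)
    (hsub : prev ⊆ G) (hlen : G.length = prev.length + 1) :
    (∃ t ∈ G, t ∉ prev) ∧ (∀ x, x ∈ G ↔ x = pvPick G prev ∨ x ∈ prev) := by
  have hex : ∃ t ∈ G, t ∉ prev := by
    by_contra hb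
    push Not at hb
    have : List.Subperm G prev := List.subperm_of_subset hG hb
    have := List.Subperm.length_le this
    omega
  refine ⟨hex, ?_⟩
  obtain ⟨hpm, hpn⟩ := pvPick_spec G prev hex
  have hnd2 : (pvPick G prev :: prev).Nodup := by simp [hnd, hpn]
  have hsub2 : (pvPick G prev :: prev) ⊆ G := by
    intro x hx
    rcases List.mem_cons.mp hx with hx | hx
    · exact hx ▸ hpm
    · exact hsub hx
  have hperm : (pvPick G prev :: prev).Perm G :=
    List.Subperm.perm_of_length_le (List.subperm_of_subset hnd2 hsub2) (by simp [hlen])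
  intro x
  rw [← hperm.mem_iff]
  simp

lemma solutionLoop_eq (l : List String) : ∀ (prev : List String) (rem : PySem.Set String)
    (ans : List Int), prev.Nodup → pvChain l prev →
    (∀ x, PySem.Set.contains rem x = true ↔ x ∈ prev) →
    solutionLoop l rem ans = ans ++ (pvChosen l prev).map (fun t => (PySem.Int.ofStr? t).getD 0) := by
  induction l with
  | nil => intro prev rem ans _ _ _; simp [solutionLoop, pvChosen]
  | cons number rest ih =>
    intro prev rem ans hnd hch hrem
    obtain ⟨hsub, hGnd, hlen, hch'⟩ := hch
    obtain ⟨hex, hmem⟩ := pvStep (pvToks number) prev hnd hGnd hsub hlen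
    have hinner := solutionInner_eq (pvToks number) prev rem hrem hex
    have hrem2 : ∀ x, x ∈ rem ↔ x ∈ prev := fun x =>
      ⟨fun h => (hrem x).1 ((PySem.Set.contains_iff rem x).mpr h),
       fun h => (PySem.Set.contains_iff rem x).mp ((hrem x).2 h)⟩
    have hrem' : ∀ x, PySem.Set.contains (PySem.Set.add rem (pvPick (pvToks number) prev)) x = true
        ↔ x ∈ pvToks number := by
      intro x
      rw [PySem.Set.contains_iff, PySem.Set.mem_add, hmem x, hrem2 x]
      tauto
    have hstep : solutionLoop (number :: rest) rem ans
        = solutionLoop rest (PySem.Set.add rem (pvPick (pvToks number) prev))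
            (ans ++ [(PySem.Int.ofStr? (pvPick (pvToks number) prev)).getD 0]) := by
      simp only [pvToks] at hinner
      rw [solutionLoop, hinner]
      rfl
    rw [hstep, ih (pvToks number) _ _ hGnd hch' hrem']
    simp [pvChosen]

lemma pvChain_subsets (l : List String) : ∀ prev, pvChain l prev → ∀ g ∈ l, prev ⊆ pvToks g := by
  induction l with
  | nil => intro prev _ g hg; simp at hg
  | cons h t ih =>
    intro prev hch g hg
    obtain ⟨hsub, _, _, hch'⟩ := hch
    rcases List.mem_cons.mp hg with hg | hg
    · exact hg ▸ hsub
    · exact List.Subset.trans hsub (ih (pvToks h) hch' g hg)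

lemma pvChain_nodups (l : List String) : ∀ prev, pvChain l prev → ∀ g ∈ l, (pvToks g).Nodup := by
  induction l with
  | nil => intro prev _ g hg; simp at hg
  | cons h t ih =>
    intro prev hch g hg
    obtain ⟨_, hnd, _, hch'⟩ := hch
    rcases List.mem_cons.mp hg with hg | hg
    · exact hg ▸ hnd
    · exact ih (pvToks h) hch' g hg

lemma pvChosen_mem_iff (l : List String) : ∀ prev, prev.Nodup → pvChain l prev →
    ∀ x, (x ∈ pvChosen l prev ↔ (∃ g ∈ l, x ∈ pvToks g) ∧ x ∉ prev) := by
  induction l with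
  | nil => intro prev _ _ x; simp [pvChosen]
  | cons g rest ih =>
    intro prev hnd hch x
    obtain ⟨hsub, hGnd, hlen, hch'⟩ := hch
    obtain ⟨hex, hmem⟩ := pvStep (pvToks g) prev hnd hGnd hsub hlen
    obtain ⟨hpm, hpn⟩ := pvPick_spec (pvToks g) prev hex
    constructor
    · intro hx
      rcases List.mem_cons.mp hx with hx | hx
      · exact ⟨⟨g, List.mem_cons_self, hx ▸ hpm⟩, hx ▸ hpn⟩
      · obtain ⟨⟨h, hh, hxh⟩, hng⟩ := (ih (pvToks g) hGnd hch' x).1 hx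
        exact ⟨⟨h, List.mem_cons_of_mem g hh, hxh⟩, fun hp => hng (hsub hp)⟩
    · rintro ⟨⟨h, hh, hxh⟩, hnp⟩
      by_cases hxg : x ∈ pvToks g
      · rcases (hmem x).1 hxg with hx | hx
        · exact hx ▸ List.mem_cons_self
        · exact absurd hx hnp
      · rcases List.mem_cons.mp hh with hh' | hh'
        · exact absurd (hh' ▸ hxh) hxg
        · exact List.mem_cons_of_mem _ ((ih (pvToks g) hGnd hch' x).2 ⟨⟨h, hh', hxh⟩, hxg⟩)

lemma pvChosen_nodup (l : List String) : ∀ prev, prev.Nodup → pvChain l prev →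
    (pvChosen l prev).Nodup := by
  induction l with
  | nil => intro prev _ _; simp [pvChosen]
  | cons g rest ih =>
    intro prev hnd hch
    obtain ⟨hsub, hGnd, hlen, hch'⟩ := hch
    obtain ⟨hex, _⟩ := pvStep (pvToks g) prev hnd hGnd hsub hlen
    obtain ⟨hpm, _⟩ := pvPick_spec (pvToks g) prev hex
    refine List.Nodup.cons ?_ (ih (pvToks g) hGnd hch')
    intro hmem
    exact ((pvChosen_mem_iff rest (pvToks g) hGnd hch' _).1 hmem).2 hpm

lemma count_flat_le (l : List String) (x : String) (h : ∀ g ∈ l, (pvToks g).Nodup) :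
    (l.flatMap pvToks).count x ≤ l.length := by
  induction l with
  | nil => simp
  | cons g rest ih =>
    have h1 : (pvToks g).count x ≤ 1 :=
      List.nodup_iff_count_le_one.mp (h g List.mem_cons_self) x
    have h2 := ih (fun g hg => h g (List.mem_cons_of_mem _ hg))
    simp only [List.flatMap_cons, List.count_append, List.length_cons]
    omega

lemma count_flat_eq (l : List String) (x : String)
    (h : ∀ g ∈ l, (pvToks g).Nodup ∧ x ∈ pvToks g) :
    (l.flatMap pvToks).count x = l.length := by
  induction l with
  | nil => simp
  | cons g rest ih =>
    have h1 : (pvToks g).count x = 1 :=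
      List.count_eq_one_of_mem (h g List.mem_cons_self).1 (h g List.mem_cons_self).2
    have h2 := ih (fun g hg => h g (List.mem_cons_of_mem _ hg))
    simp only [List.flatMap_cons, List.count_append, List.length_cons]
    omega

lemma pvChosen_counts (l : List String) : ∀ prev, prev.Nodup → pvChain l prev →
    List.Pairwise (fun a b => (l.flatMap pvToks).count b < (l.flatMap pvToks).count a)
      (pvChosen l prev) := by
  induction l with
  | nil => intro prev _ _; simp [pvChosen]
  | cons g rest ih =>
    intro prev hnd hch
    obtain ⟨hsub, hGnd, hlen, hch'⟩ := hch
    obtain ⟨hex, hmem⟩ := pvStep (pvToks g) prev hnd hGnd hsub hlen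
    obtain ⟨hpm, hpn⟩ := pvPick_spec (pvToks g) prev hex
    have hGsub : ∀ h ∈ rest, pvToks g ⊆ pvToks h := pvChain_subsets rest (pvToks g) hch'
    have hAllNd : ∀ h ∈ rest, (pvToks h).Nodup := pvChain_nodups rest (pvToks g) hch'
    have hnotg : ∀ b ∈ pvChosen rest (pvToks g), b ∉ pvToks g :=
      fun b hb => ((pvChosen_mem_iff rest (pvToks g) hGnd hch' b).1 hb).2
    simp only [pvChosen, List.flatMap_cons, List.count_append]
    refine List.Pairwise.cons ?_ ?_
    · intro b hb
      have hb0 : (pvToks g).count b = 0 := List.count_eq_zero_of_not_mem (hnotg b hb)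
      have hble : (rest.flatMap pvToks).count b ≤ rest.length := count_flat_le rest b hAllNd
      have hc1 : (pvToks g).count (pvPick (pvToks g) prev) = 1 :=
        List.count_eq_one_of_mem hGnd hpm
      have hcr : (rest.flatMap pvToks).count (pvPick (pvToks g) prev) = rest.length :=
        count_flat_eq rest _ (fun h hh => ⟨hAllNd h hh, hGsub h hh hpm⟩)
      omega
    · refine List.Pairwise.imp_of_mem ?_ (ih (pvToks g) hGnd hch')
      intro a b ha hb hab
      have ha0 : (pvToks g).count a = 0 := List.count_eq_zero_of_not_mem (hnotg a ha)
      have hb0 : (pvToks g).count b = 0 := List.count_eq_zero_of_not_mem (hnotg b hb)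
      omega

lemma pvChain_build (ss : List String)
    (h1 : ∀ g ∈ ss, (pvToks g).Nodup)
    (h3 : ∀ g ∈ ss, ∀ h ∈ ss, (pvToks g).length ≤ (pvToks h).length → ∀ t ∈ pvToks g, t ∈ pvToks h) :
    ∀ (l prev : List String), (∀ g ∈ l, g ∈ ss) →
    l.map (fun g => (pvToks g).length) = List.range' (prev.length + 1) l.length →
    (prev = [] ∨ ∃ g₀, g₀ ∈ ss ∧ pvToks g₀ = prev) →
    pvChain l prev := by
  intro l
  induction l with
  | nil => intro prev _ _ _; trivial
  | cons g rest ih =>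
    intro prev hmem hsizes hprev
    have hgss : g ∈ ss := hmem g List.mem_cons_self
    rw [List.length_cons, List.range'_succ, List.map_cons, List.cons_eq_cons] at hsizes
    refine ⟨?_, h1 g hgss, hsizes.1, ?_⟩
    · rcases hprev with rfl | ⟨g₀, hg₀, rfl⟩
      · exact List.nil_subset _
      · exact h3 g₀ hg₀ g hgss (by omega)
    · refine ih (pvToks g) (fun h hh => hmem h (List.mem_cons_of_mem _ hh)) ?_
        (Or.inr ⟨g, hgss, rfl⟩)
      rw [hsizes.2]
      congr 1
      omega

-- ===== VERDICT (by name: the statement is the Claim_ definition above) =====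
theorem solution_spec : Claim_equal_solution := by
  intro s _ hpre
  unfold Spec_solution
  obtain ⟨h1, h2, h3, h4⟩ := hpre
  have hdef : solution s = solutionLoop
      (PySem.List.sorted (pvGroupStrs s) (fun x => PySem.Str.len x)) PySem.Set.empty [] := rfl
  have hBdef : solution_alt s = (PySem.List.sorted (PySem.List.dedup (pvAllToks s))
      (fun t => -(PySem.List.count (pvAllToks s) t : Int))).map
      (fun t => (PySem.Int.ofStr? t).getD 0) := rfl
  have hAll : pvAllToks s = (pvGroupStrs s).flatMap pvToks := rfl
  rw [hdef, hBdef, hAll, PySem.List.dedup_eq_ofList]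
  generalize pvGroupStrs s = ss at h1 h2 h3 h4 ⊢
  set ysS := PySem.List.sorted ss (fun g => (pvToks g).length) with hys
  have hpermS : ysS.Perm ss := PySem.List.sorted_perm ss _ false
  have hrn : (List.range' 1 ss.length).Nodup := List.nodup_range' 1
  have hndsz : ((ysS.map fun g => (pvToks g).length)).Nodup :=
    ((hpermS.map _).trans h2).nodup_iff.mpr hrn
  have hpwle : List.Pairwise (· ≤ ·) (ysS.map fun g => (pvToks g).length) :=
    PySem.List.sorted_map_key_pairwise ss _
  have hpwlt : List.Pairwise (· < ·) (ysS.map fun g => (pvToks g).length) :=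
    (hpwle.and hndsz).imp (fun h => lt_of_le_of_ne h.1 h.2)
  have hsz_eq : (ysS.map fun g => (pvToks g).length) = List.range' 1 ss.length := by
    have e1 : PySem.List.sorted (ss.map fun g => (pvToks g).length) (fun x => x)
        = (ysS.map fun g => (pvToks g).length) :=
      PySem.List.sorted_eq_of_perm_of_pairwise_lt _ _ _ (hpermS.map _) hpwlt
    have e2 : PySem.List.sorted (ss.map fun g => (pvToks g).length) (fun x => x)
        = List.range' 1 ss.length :=
      PySem.List.sorted_eq_of_perm_of_pairwise_lt _ _ _ h2.symm (List.pairwise_lt_range' 1)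
    rw [← e1, e2]
  have hpwlt' : List.Pairwise (fun a b => (pvToks a).length < (pvToks b).length) ysS :=
    List.pairwise_map.mp hpwlt
  have hchain : pvChain ysS [] := by
    refine pvChain_build ss (fun g hg => (h1 g hg).1) h3 ysS []
      (fun g hg => (PySem.List.mem_sorted ss _ false g).mp hg) ?_ (Or.inl rfl)
    rw [hys, PySem.List.length_sorted]
    simpa using hsz_eq
  -- A's sort by string length is the sort by group size
  have hysA : PySem.List.sorted ss (fun x => PySem.Str.len x) = ysS := by
    refine PySem.List.sorted_eq_of_perm_of_pairwise_lt _ _ _ hpermS ?_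
    refine List.Pairwise.imp_of_mem ?_ hpwlt'
    intro a b ha hb hab
    exact h4 a ((PySem.List.mem_sorted ss _ false a).mp ha)
      b ((PySem.List.mem_sorted ss _ false b).mp hb) hab
  have htoks : (ss.flatMap pvToks).Perm (ysS.flatMap pvToks) :=
    (hpermS.flatMap (fun a _ => List.Perm.refl _)).symm
  have hB : PySem.List.sorted (PySem.Set.ofList (ss.flatMap pvToks))
      (fun t => -(PySem.List.count (ss.flatMap pvToks) t : Int)) = pvChosen ysS [] := by
    refine PySem.List.sorted_eq_of_perm_of_pairwise_lt _ _ _ ?_ ?_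
    · refine (List.perm_ext_iff_of_nodup
        (pvChosen_nodup ysS [] List.nodup_nil hchain) (PySem.Set.nodup_ofList _)).mpr ?_
      intro a
      rw [pvChosen_mem_iff ysS [] List.nodup_nil hchain a, PySem.Set.mem_ofList,
        htoks.mem_iff]
      simp [List.mem_flatMap]
    · refine List.Pairwise.imp ?_ (pvChosen_counts ysS [] List.nodup_nil hchain)
      intro a b hab
      have ha := htoks.count_eq a
      have hb := htoks.count_eq b
      simp only [PySem.List.count_eq]
      omega
  rw [hysA, hB,
    solutionLoop_eq ysS [] PySem.Set.empty [] List.nodup_nil hchain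
      (by intro x; rw [PySem.Set.contains_iff]; simp [PySem.Set.empty])]
  simp
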